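-- pv_equiv track=rewrite | github.com/XXXXXXXXsegfault/2D_ILP | main.py | div_up
-- ===== SOURCE A (Python) =====
-- def div_up(a,b):
--     value = a // b
--     if b > 0:
--         while value * b > a:
--             value -= 1
--         while value * b < a:
--             value += 1
--     else:
--         while value * b < a:
--             value -= 1
--         while value * b > a:
--             value += 1
--     return value
-- ===== SOURCE B (Python) =====
-- def div_up(a, b):
--     # closed-form ceiling division: ceil(a/b) == -((-a)//b) for every nonzero b
--     return -(-a // b)
-- ===== Notes on version B (the rewrite author's own statement) =====
-- stated objective: idiomatic
-- what changed: Replaced the floor-then-adjust while loops with the closed-form ceiling division -(-a // b), a single arithmetic expression with no loops or branches.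
import Mathlib
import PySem

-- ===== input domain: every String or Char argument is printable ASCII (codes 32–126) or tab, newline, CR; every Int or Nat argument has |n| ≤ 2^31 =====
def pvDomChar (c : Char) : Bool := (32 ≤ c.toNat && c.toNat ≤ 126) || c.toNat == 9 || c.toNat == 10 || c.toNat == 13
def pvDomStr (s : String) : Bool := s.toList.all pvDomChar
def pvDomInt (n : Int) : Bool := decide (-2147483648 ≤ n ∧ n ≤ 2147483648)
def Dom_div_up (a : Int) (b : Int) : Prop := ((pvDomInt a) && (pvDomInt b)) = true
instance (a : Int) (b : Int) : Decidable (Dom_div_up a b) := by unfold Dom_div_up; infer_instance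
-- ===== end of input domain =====

-- B replaces A's floor-then-adjust while loops by the closed-form ceiling division -((-a) // b) (idiomatic, loop-free).

-- ===== PORT A =====
-- while value * b > a: value -= 1   (A runs this inside the b > 0 branch; the 0 < b conjunct only
-- guarantees termination and is true at every call site, so the computation is unchanged)
def divUpDownPos (a b value : Int) : Int :=
  if h : value * b > a ∧ 0 < b then divUpDownPos a b (value - 1) else value
  termination_by (value * b - a).toNat
  decreasing_by
    have hb : (value - 1) * b = value * b - b := by ring
    omega

-- while value * b < a: value += 1   (b > 0 branch)
def divUpUpPos (a b value : Int) : Int :=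
  if h : value * b < a ∧ 0 < b then divUpUpPos a b (value + 1) else value
  termination_by (a - value * b).toNat
  decreasing_by
    have hb : (value + 1) * b = value * b + b := by ring
    omega

-- while value * b < a: value -= 1   (else branch; b < 0 conjunct only for termination)
def divUpDownNeg (a b value : Int) : Int :=
  if h : value * b < a ∧ b < 0 then divUpDownNeg a b (value - 1) else value
  termination_by (a - value * b).toNat
  decreasing_by
    have hb : (value - 1) * b = value * b - b := by ring
    omega

-- while value * b > a: value += 1   (else branch)
def divUpUpNeg (a b value : Int) : Int :=
  if h : value * b > a ∧ b < 0 then divUpUpNeg a b (value + 1) else value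
  termination_by (value * b - a).toNat
  decreasing_by
    have hb : (value + 1) * b = value * b + b := by ring
    omega

def div_up (a : Int) (b : Int) : Int :=
  let value := PySem.Int.floordiv a b
  if b > 0 then divUpUpPos a b (divUpDownPos a b value)
  else divUpUpNeg a b (divUpDownNeg a b value)

-- ===== PORT B =====
def div_up_alt (a : Int) (b : Int) : Int := -(PySem.Int.floordiv (-a) b)

-- ===== PRECONDITION & SPEC =====
-- b = 0 raises ZeroDivisionError in Python's a // b
def Pre_div_up (a : Int) (b : Int) : Prop := b ≠ 0
instance (a : Int) (b : Int) : Decidable (Pre_div_up a b) := by unfold Pre_div_up; infer_instance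
def pvWitness_div_up : Int × Int := (7, 3)

def Spec_div_up (a : Int) (b : Int) (out : Int) : Prop := out = div_up_alt a b
instance (a : Int) (b : Int) (out : Int) : Decidable (Spec_div_up a b out) := by unfold Spec_div_up; infer_instance

-- ===== CLAIM (what is proved, stated in full; the proofs are below) =====
def Claim_equal_div_up : Prop := ∀ (a : Int) (b : Int), Dom_div_up a b → Pre_div_up a b → Spec_div_up a b (div_up a b)

-- ===== LEMMAS AND PROOFS =====

-- b > 0: the first while loop never fires because floor satisfies value*b ≤ a
theorem divUpDownPos_noop (a b value : Int) (h : value * b ≤ a) :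
    divUpDownPos a b value = value := by
  rw [divUpDownPos]; exact dif_neg (by omega)

-- b < 0: the first while loop never fires because floor satisfies a ≤ value*b
theorem divUpDownNeg_noop (a b value : Int) (h : a ≤ value * b) :
    divUpDownNeg a b value = value := by
  rw [divUpDownNeg]; exact dif_neg (by omega)

-- b > 0: the increment loop started anywhere with (value-1)*b < a ends at the ceiling
theorem divUpUpPos_eq (a b value : Int) (hb : 0 < b) (h : (value - 1) * b < a) :
    divUpUpPos a b value = -(PySem.Int.floordiv (-a) b) := by
  rw [eq_comm, PySem.Int.neg_floordiv_neg_eq_iff_of_pos hb]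
  revert h
  induction value using divUpUpPos.induct a b with
  | case1 value hcond ih =>
    intro _
    rw [divUpUpPos, dif_pos hcond]
    refine ih ?_
    have e : (value + 1 - 1) * b = value * b := by ring
    omega
  | case2 value hncond =>
    intro h
    rw [divUpUpPos, dif_neg hncond]
    exact ⟨h, by omega⟩

-- b < 0: the increment loop started anywhere with a < (value-1)*b ends at the ceiling
theorem divUpUpNeg_eq (a b value : Int) (hb : b < 0) (h : a < (value - 1) * b) :
    divUpUpNeg a b value = -(PySem.Int.floordiv (-a) b) := by
  have hfd : PySem.Int.floordiv (-a) b = PySem.Int.floordiv (- -a) (-b) := by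
    rw [neg_neg, ← PySem.Int.floordiv_neg_neg a (-b), neg_neg]
  rw [hfd, eq_comm, PySem.Int.neg_floordiv_neg_eq_iff_of_pos (by omega : (0:Int) < -b)]
  revert h
  induction value using divUpUpNeg.induct a b with
  | case1 value hcond ih =>
    intro _
    rw [divUpUpNeg, dif_pos hcond]
    refine ih ?_
    have e : (value + 1 - 1) * b = value * b := by ring
    omega
  | case2 value hncond =>
    intro h
    rw [divUpUpNeg, dif_neg hncond]
    have e1 : (value - 1) * (-b) = -((value - 1) * b) := by ring
    have e2 : value * (-b) = -(value * b) := by ring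
    constructor
    · omega
    · omega

-- ===== VERDICT (by name: the statement is the Claim_ definition above) =====
theorem div_up_spec : Claim_equal_div_up := by
  intro a b _ hb0
  unfold Pre_div_up at hb0
  unfold Spec_div_up div_up div_up_alt
  simp only []
  have hfm := PySem.Int.floordiv_mul_add_mod a b
  by_cases hb : b > 0
  · have hmn := PySem.Int.mod_nonneg a hb
    have hml := PySem.Int.mod_lt a hb
    have h1 : PySem.Int.floordiv a b * b ≤ a := by omega
    have h2 : (PySem.Int.floordiv a b - 1) * b < a := by
      have e : (PySem.Int.floordiv a b - 1) * b = PySem.Int.floordiv a b * b - b := by ring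
      omega
    rw [if_pos hb, divUpDownPos_noop a b (PySem.Int.floordiv a b) h1]
    exact divUpUpPos_eq a b (PySem.Int.floordiv a b) hb h2
  · have hbneg : b < 0 := by omega
    have hmb := PySem.Int.mod_neg_bounds a hbneg
    have h1 : a ≤ PySem.Int.floordiv a b * b := by omega
    have h2 : a < (PySem.Int.floordiv a b - 1) * b := by
      have e : (PySem.Int.floordiv a b - 1) * b = PySem.Int.floordiv a b * b - b := by ring
      omega
    rw [if_neg hb, divUpDownNeg_noop a b (PySem.Int.floordiv a b) h1]
    exact divUpUpNeg_eq a b (PySem.Int.floordiv a b) hbneg h2
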